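-- pv_equiv track=rewrite | github.com/QuBenhao/LeetCode | problems/problems_3813/solution.py | vowelConsonantScore
-- ===== SOURCE A (Python) =====
-- def vowelConsonantScore(s: str) -> int:
--     v = c = 0
--     for ch in s:
--         if not ch.isalpha():
--             continue
--         if ch in VOWELS:
--             v += 1
--         else:
--             c += 1
--     return c if not c else v // c
--
-- VOWELS = "aeiou"
-- ===== SOURCE B (Python) =====
-- def vowelConsonantScore(s: str) -> int:
--     cnt = {}
--     for ch in s:
--         cnt[ch] = cnt.get(ch, 0) + 1
--     v = sum(n for ch, n in cnt.items() if ch in "aeiou")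
--     total = sum(n for ch, n in cnt.items() if ch.isalpha())
--     c = total - v
--     return 0 if c == 0 else v // c
-- ===== Notes on version B (the rewrite author's own statement) =====
-- stated objective: alternative
-- what changed: Replaces A's sequential per-char branch counters with a Counter-style frequency dict built in one pass, from which the vowel sum and the alphabetic total are aggregated separately and c derived as total - v.
import Mathlib
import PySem

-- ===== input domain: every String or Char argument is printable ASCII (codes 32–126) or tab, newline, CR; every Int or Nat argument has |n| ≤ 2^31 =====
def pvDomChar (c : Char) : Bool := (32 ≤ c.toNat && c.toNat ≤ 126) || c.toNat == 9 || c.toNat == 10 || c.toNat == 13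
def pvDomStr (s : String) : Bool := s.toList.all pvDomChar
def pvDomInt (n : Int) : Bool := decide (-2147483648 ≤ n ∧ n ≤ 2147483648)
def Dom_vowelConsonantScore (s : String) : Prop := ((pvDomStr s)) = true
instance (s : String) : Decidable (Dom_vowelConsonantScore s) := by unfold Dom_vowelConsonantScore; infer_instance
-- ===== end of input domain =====

-- B builds a frequency dict in one pass and derives v, the alphabetic total and c from it
-- (objective: alternative/idiomatic Counter-style aggregation; same asymptotic cost).

-- ===== PORT A =====
def pvVowels : List Char := "aeiou".toList

def vowelConsonantScore (s : String) : Int :=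
  let vc := s.toList.foldl
    (fun (vc : Int × Int) ch =>
      if ¬ PySem.Chars.isalpha ch then vc
      else if ch ∈ pvVowels then (vc.1 + 1, vc.2)
      else (vc.1, vc.2 + 1))
    (0, 0)
  if vc.2 == 0 then vc.2 else PySem.Int.floordiv vc.1 vc.2

-- ===== PORT B =====
def vowelConsonantScore_alt (s : String) : Int :=
  let cnt := s.toList.foldl (fun (d : PySem.Dict Char Int) ch => d.insert ch (d.getD ch 0 + 1))
    PySem.Dict.empty
  let v := ((cnt.items.filter (fun p => p.1 ∈ pvVowels)).map (·.2)).sum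
  let total := ((cnt.items.filter (fun p => PySem.Chars.isalpha p.1)).map (·.2)).sum
  let c := total - v
  if c == 0 then 0 else PySem.Int.floordiv v c

-- ===== PRECONDITION & SPEC =====
def Spec_vowelConsonantScore (s : String) (out : Int) : Prop := out = vowelConsonantScore_alt s
instance (s : String) (out : Int) : Decidable (Spec_vowelConsonantScore s out) := by unfold Spec_vowelConsonantScore; infer_instance

-- ===== CLAIM (what is proved, stated in full; the proofs are below) =====
def Claim_equal_vowelConsonantScore : Prop := ∀ (s : String), Dom_vowelConsonantScore s → Spec_vowelConsonantScore s (vowelConsonantScore s)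

-- ===== LEMMAS AND PROOFS =====

-- indicator sum over a list not containing x is 0
theorem pv_ind_sum_zero (x : Char) (l : List Char) (hx : x ∉ l) :
    (l.map (fun k => if x = k then (1 : Int) else 0)).sum = 0 := by
  induction l with
  | nil => simp
  | cons y ys ih =>
    simp only [List.mem_cons, not_or] at hx
    simp [List.map_cons, hx.1, ih hx.2]

-- indicator sum over a nodup list containing x is 1 on the P-filter iff P x
theorem pv_ind_sum (x : Char) (P : Char → Bool) :
    ∀ l : List Char, l.Nodup → x ∈ l →
      ((l.filter P).map (fun k => if x = k then (1 : Int) else 0)).sum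
        = if P x then 1 else 0 := by
  intro l
  induction l with
  | nil => intro _ h; simp at h
  | cons y ys ih =>
    intro hnd hm
    rcases List.nodup_cons.mp hnd with ⟨hyn, hndys⟩
    rcases List.mem_cons.mp hm with h | h
    · subst h
      by_cases hP : P x
      · simp [hP, pv_ind_sum_zero x (ys.filter P) (by
          intro hc; exact hyn (List.mem_of_mem_filter hc))]
      · simp [hP, pv_ind_sum_zero x (ys.filter P) (by
          intro hc; exact hyn (List.mem_of_mem_filter hc))]
    · have hxy : x ≠ y := fun he => hyn (he ▸ h)
      by_cases hP : P y
      · simp [hP, hxy, ih hndys h]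
      · simp [hP, ih hndys h]

-- sum of counts over the P-filtered distinct keys = countP over the raw list,
-- for any nodup key list covering the raw list
theorem pv_sum_count (P : Char → Bool) (l : List Char) (hnd : l.Nodup) :
    ∀ xs : List Char, (∀ x ∈ xs, x ∈ l) →
      ((l.filter P).map (fun k => (xs.count k : Int))).sum = (xs.countP P : Int) := by
  intro xs
  induction xs with
  | nil => intro _; simp
  | cons x t ih =>
    intro hcov
    have hxl : x ∈ l := hcov x (List.mem_cons_self ..)
    have hcov' : ∀ y ∈ t, y ∈ l := fun y hy => hcov y (List.mem_cons_of_mem _ hy)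
    have hcnt : ∀ k : Char, ((x :: t).count k : Int)
        = (t.count k : Int) + (if x = k then (1 : Int) else 0) := by
      intro k
      by_cases h : x = k
      · subst h; simp
      · simp [h]
    calc ((l.filter P).map (fun k => ((x :: t).count k : Int))).sum
        = ((l.filter P).map (fun k => (t.count k : Int) + (if x = k then (1:Int) else 0))).sum := by
          congr 1; exact List.map_congr_left (fun k _ => hcnt k)
      _ = ((l.filter P).map (fun k => (t.count k : Int))).sum
          + ((l.filter P).map (fun k => if x = k then (1:Int) else 0)).sum := by
          rw [← List.sum_map_add]
      _ = (t.countP P : Int) + (if P x then 1 else 0) := by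
          rw [ih hcov', pv_ind_sum x P l hnd hxl]
      _ = ((x :: t).countP P : Int) := by
          by_cases hP : P x <;> simp [hP]

-- every vowel is alphabetic
theorem pv_vowel_alpha (ch : Char) (h : ch ∈ pvVowels) : PySem.Chars.isalpha ch = true := by
  fin_cases h <;> decide

-- splitting the alphabetic count into vowels and consonants
theorem pv_countP_split (xs : List Char) :
    xs.countP (fun ch => PySem.Chars.isalpha ch)
      = xs.countP (fun ch => decide (ch ∈ pvVowels))
        + xs.countP (fun ch => PySem.Chars.isalpha ch && !decide (ch ∈ pvVowels)) := by
  induction xs with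
  | nil => simp
  | cons x t ih =>
    by_cases hv : x ∈ pvVowels
    · simp [hv, pv_vowel_alpha x hv, ih]; omega
    · by_cases ha : PySem.Chars.isalpha x <;> simp [hv, ha, ih] <;> omega

-- A's loop computes the vowel count and the alpha-but-not-vowel count
theorem pv_foldA (xs : List Char) : ∀ v0 c0 : Int,
    xs.foldl
      (fun (vc : Int × Int) ch =>
        if ¬ PySem.Chars.isalpha ch then vc
        else if ch ∈ pvVowels then (vc.1 + 1, vc.2)
        else (vc.1, vc.2 + 1))
      (v0, c0)
    = (v0 + (xs.countP (fun ch => decide (ch ∈ pvVowels)) : Int),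
       c0 + (xs.countP (fun ch => PySem.Chars.isalpha ch && !decide (ch ∈ pvVowels)) : Int)) := by
  induction xs with
  | nil => intro v0 c0; simp
  | cons x t ih =>
    intro v0 c0
    rw [List.foldl_cons]
    by_cases ha : PySem.Chars.isalpha x
    · by_cases hv : x ∈ pvVowels
      · have hstep : (if ¬ PySem.Chars.isalpha x then ((v0, c0) : Int × Int)
            else if x ∈ pvVowels then (v0 + 1, c0) else (v0, c0 + 1)) = (v0 + 1, c0) := by
          simp [ha, hv]
        simp only [hstep]
        rw [ih]
        simp only [List.countP_cons, hv, ha, Prod.mk.injEq]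
        constructor <;> (push_cast; simp) <;> ring
      · have hstep : (if ¬ PySem.Chars.isalpha x then ((v0, c0) : Int × Int)
            else if x ∈ pvVowels then (v0 + 1, c0) else (v0, c0 + 1)) = (v0, c0 + 1) := by
          simp [ha, hv]
        simp only [hstep]
        rw [ih]
        simp only [List.countP_cons, hv, ha, Prod.mk.injEq]
        constructor <;> (push_cast; simp) <;> ring
    · have hstep : (if ¬ PySem.Chars.isalpha x then ((v0, c0) : Int × Int)
          else if x ∈ pvVowels then (v0 + 1, c0) else (v0, c0 + 1)) = (v0, c0) := by
        simp [ha]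
      simp only [hstep]
      rw [ih]
      have hna : (PySem.Chars.isalpha x && !decide (x ∈ pvVowels)) = false := by
        simp [ha]
      simp only [List.countP_cons, hna, Prod.mk.injEq]
      have hnv : x ∉ pvVowels := fun h => ha (pv_vowel_alpha x h)
      constructor <;> (push_cast; simp [hnv])

-- a dict-items aggregation over the counter is a countP of the raw list
theorem pv_sum_helper (xs : List Char) (P : Char → Bool) :
    (List.map ((fun (x : Char × Int) => x.2) ∘ fun k => (k, (xs.count k : Int)))
      (List.filter ((fun (p : Char × Int) => P p.1) ∘ fun k => (k, (xs.count k : Int)))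
        (PySem.Set.ofList xs))).sum = (xs.countP P : Int) := by
  have h1 : ((fun (p : Char × Int) => P p.1) ∘ fun k => (k, (xs.count k : Int))) = P := rfl
  have h2 : ((fun (x : Char × Int) => x.2) ∘ fun k => (k, (xs.count k : Int)))
      = fun k => (xs.count k : Int) := rfl
  rw [h1, h2]
  exact pv_sum_count P _ (PySem.Set.nodup_ofList _) xs
    (fun x hx => (PySem.Set.mem_ofList ..).mpr hx)

-- B's dict aggregations evaluate to the same two counts
theorem pv_alt_eq (s : String) :
    vowelConsonantScore_alt s =
      (let v : Int := (s.toList.countP (fun ch => decide (ch ∈ pvVowels)) : Int)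
       let c : Int := (s.toList.countP (fun ch => PySem.Chars.isalpha ch && !decide (ch ∈ pvVowels)) : Int)
       if c == 0 then 0 else PySem.Int.floordiv v c) := by
  unfold vowelConsonantScore_alt
  simp only [PySem.Dict.foldl_insert_getD_add_one_eq_counter, PySem.Dict.items_counter,
    List.filter_map, List.map_map]
  rw [pv_sum_helper, pv_sum_helper s.toList (fun ch => decide (ch ∈ pvVowels))]
  have h3 : (s.toList.countP (fun ch => PySem.Chars.isalpha ch) : Int)
      - (s.toList.countP (fun ch => decide (ch ∈ pvVowels)) : Int)
      = (s.toList.countP (fun ch => PySem.Chars.isalpha ch && !decide (ch ∈ pvVowels)) : Int) := by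
    have := pv_countP_split s.toList
    omega
  rw [h3]

-- ===== VERDICT (by name: the statement is the Claim_ definition above) =====
theorem vowelConsonantScore_spec : Claim_equal_vowelConsonantScore := by
  intro s _
  unfold Spec_vowelConsonantScore
  rw [pv_alt_eq]
  unfold vowelConsonantScore
  rw [pv_foldA]
  simp only [zero_add]
  by_cases h : (((s.toList.countP (fun ch => PySem.Chars.isalpha ch && !decide (ch ∈ pvVowels)) : Int)) == 0) = true
  · rw [if_pos h, if_pos h]; simpa using h
  · rw [if_neg h, if_neg h]
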